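-- pv_equiv track=rewrite | github.com/EricR-STCU/AdventOfCode | 2023/12/day12.py | get
-- ===== SOURCE A (Python) =====
-- def get(s, map):
--     x = 0
--     new = ''
--     for c in s:
--         if c == '?':
--             new += map[x]
--             x += 1
--         else:
--             new += c
--     return new
-- ===== SOURCE B (Python) =====
-- def get(s, map):
--     parts = s.split('?')
--     out = [parts[0]]
--     for i, part in enumerate(parts[1:]):
--         out.append(map[i])
--         out.append(part)
--     return ''.join(out)
-- ===== Notes on version B (the rewrite author's own statement) =====
-- stated objective: alternative
-- what changed: B splits s on '?' once and interleaves the literal segments with successive map characters (index derived from segment position), instead of A's per-character scan with an explicit counter.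
import Mathlib
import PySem

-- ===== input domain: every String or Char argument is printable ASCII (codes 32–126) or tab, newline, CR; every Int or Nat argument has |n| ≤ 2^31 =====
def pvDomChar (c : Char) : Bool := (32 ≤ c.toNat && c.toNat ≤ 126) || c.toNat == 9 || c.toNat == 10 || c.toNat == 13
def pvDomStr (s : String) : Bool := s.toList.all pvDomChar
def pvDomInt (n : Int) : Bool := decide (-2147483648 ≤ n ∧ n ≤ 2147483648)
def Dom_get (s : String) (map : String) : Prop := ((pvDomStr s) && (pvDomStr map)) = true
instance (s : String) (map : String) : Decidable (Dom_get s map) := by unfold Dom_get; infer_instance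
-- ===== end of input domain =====

-- B replaces A's per-character scan with split-on-'?' + interleave with map chars (alternative decomposition; return value only).

-- ===== PORT A =====
-- A's loop: counter x, accumulator new, one character at a time.
-- map[x] is PySem.List.pyGet?; the IndexError case (none) lies outside Pre_get, where we default to ' '.
def getLoop (map : List Char) (x : Nat) (new : List Char) : List Char → List Char
  | [] => new
  | c :: rest =>
    if c = '?' then getLoop map (x + 1) (new ++ [(PySem.List.pyGet? map (x : Int)).getD ' ']) rest
    else getLoop map x (new ++ [c]) rest

def get (s : String) (map : String) : String :=
  String.ofList (getLoop map.toList 0 [] s.toList)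

-- ===== PORT B =====
-- Source B: parts = s.split('?'); out = [parts[0]]; for i, part in enumerate(parts[1:]): out += [map[i], part]; return ''.join(out)
def get_alt (s : String) (map : String) : String :=
  String.ofList (PySem.Chars.join []
    ((((s.toList.splitOn '?').drop 1).zipIdx).foldl
      (fun acc pi => acc ++ [[(PySem.List.pyGet? map.toList (pi.2 : Int)).getD ' '], pi.1])
      [(s.toList.splitOn '?').headD []]))

-- ===== PRECONDITION & SPEC =====
-- Pre_ excludes inputs where s has more '?' than map has characters: there Python A (and B) raise IndexError.
def Pre_get (s : String) (map : String) : Prop := s.toList.count '?' ≤ map.toList.length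
instance (s : String) (map : String) : Decidable (Pre_get s map) := by unfold Pre_get; infer_instance
def pvWitness_get : String × String := ("a?b?c", "xy")
def Spec_get (s : String) (map : String) (out : String) : Prop := out = get_alt s map
instance (s : String) (map : String) (out : String) : Decidable (Spec_get s map out) := by unfold Spec_get; infer_instance

-- ===== CLAIM (what is proved, stated in full; the proofs are below) =====
def Claim_equal_get : Prop := ∀ (s : String) (map : String), Dom_get s map → Pre_get s map → Spec_get s map (get s map)

-- ===== LEMMAS AND PROOFS =====

-- the character substituted for the x-th '?'
def getc (m : List Char) (x : Nat) : Char := (PySem.List.pyGet? m (x : Int)).getD ' '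

-- A's result without the accumulator
def aRes (m : List Char) (x : Nat) : List Char → List Char
  | [] => []
  | c :: rest => if c = '?' then getc m x :: aRes m (x + 1) rest else c :: aRes m x rest

-- B's glue of the tail segments, starting at map index x
def glue (m : List Char) (x : Nat) : List (List Char) → List Char
  | [] => []
  | q :: qs => (getc m x :: q) ++ glue m (x + 1) qs

def bGlue (m : List Char) (x : Nat) : List (List Char) → List Char
  | [] => []
  | p :: ps => p ++ glue m x ps

theorem getLoop_eq_aRes (m : List Char) (cs : List Char) : ∀ (x : Nat) (new : List Char),
    getLoop m x new cs = new ++ aRes m x cs := by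
  induction cs with
  | nil => intro x new; simp [getLoop, aRes]
  | cons c rest ih =>
    intro x new
    by_cases h : c = '?' <;> simp [getLoop, aRes, h, ih, getc]

theorem aRes_eq_bGlue (m : List Char) (cs : List Char) : ∀ (x : Nat),
    aRes m x cs = bGlue m x (List.splitOnP (fun c => c == '?') cs) := by
  induction cs with
  | nil => intro x; rw [List.splitOnP_nil]; rfl
  | cons c rest ih =>
    intro x
    rcases hps : List.splitOnP (fun c => c == '?') rest with _ | ⟨p, ps⟩
    · exact absurd hps (List.splitOnP_ne_nil _ _)
    · rw [List.splitOnP_cons]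
      by_cases h : c = '?'
      · subst h
        rw [if_pos (by decide),
          show aRes m x ('?' :: rest) = getc m x :: aRes m (x + 1) rest from by simp [aRes],
          ih, hps]
        rfl
      · rw [if_neg (by simp [h]),
          show aRes m x (c :: rest) = c :: aRes m x rest from by simp [aRes, h],
          ih, hps]
        rfl

theorem join_nil_eq_flatten (l : List (List Char)) : PySem.Chars.join [] l = l.flatten := by
  induction l with
  | nil => rfl
  | cons a l ih =>
    cases l with
    | nil => simp [PySem.Chars.join, List.intercalate]
    | cons b l' =>
      simp only [PySem.Chars.join, List.intercalate] at *
      simpa [List.intersperse] using ih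

theorem flatten_zipIdx_eq_glue (m : List Char) (ps : List (List Char)) : ∀ (x : Nat),
    (List.flatMap (fun pi : List Char × Nat => [[getc m pi.2], pi.1]) (ps.zipIdx x)).flatten
      = glue m x ps := by
  induction ps with
  | nil => intro x; simp; rfl
  | cons q qs ih => intro x; simp [List.zipIdx_cons, glue, ih]

theorem get_eq_get_alt (s map : String) : get s map = get_alt s map := by
  unfold _root_.get get_alt
  rcases hps : s.toList.splitOn '?' with _ | ⟨p, ps⟩
  · exact absurd hps (List.splitOnP_ne_nil _ _)
  · rw [PySem.List.foldl_append_eq_flatMap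
        (fun pi : List Char × Nat => [[(PySem.List.pyGet? map.toList (pi.2 : Int)).getD ' '], pi.1])]
    rw [join_nil_eq_flatten]
    rw [getLoop_eq_aRes, List.nil_append, aRes_eq_bGlue]
    unfold List.splitOn at hps
    rw [hps]
    show String.ofList (bGlue map.toList 0 (p :: ps)) = _
    simp only [List.headD_cons, List.drop_succ_cons, List.drop_zero, bGlue,
      List.flatten_append, List.flatten_cons, List.flatten_nil, List.append_nil]
    have h2 := flatten_zipIdx_eq_glue map.toList ps 0
    simp only [getc] at h2
    rw [h2]

-- ===== VERDICT (by name: the statement is the Claim_ definition above) =====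
theorem get_spec : Claim_equal_get := by
  intro s map _ _
  unfold Spec_get
  exact get_eq_get_alt s map
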